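-- pv_equiv track=rewrite | github.com/opendatalab/MinerU | magic_pdf/para/para_split_v2.py | find_consecutive_true_regions
-- ===== SOURCE A (Python) =====
-- def find_consecutive_true_regions(input_array):
--     start_index = None  # 连续True区域的起始索引
--     regions = []  # 用于保存所有连续True区域的起始和结束索引
--
--     for i in range(len(input_array)):
--         # 如果我们找到了一个True值，并且当前并没有在连续True区域中
--         if input_array[i] and start_index is None:
--             start_index = i  # 记录连续True区域的起始索引
--
--         # 如果我们找到了一个False值，并且当前在连续True区域中
--         elif not input_array[i] and start_index is not None:
--             # 如果连续True区域长度大于1，那么将其添加到结果列表中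
--             if i - start_index > 1:
--                 regions.append((start_index, i - 1))
--             start_index = None  # 重置起始索引
--
--     # 如果最后一个元素是True，那么需要将最后一个连续True区域加入到结果列表中
--     if start_index is not None and len(input_array) - start_index > 1:
--         regions.append((start_index, len(input_array) - 1))
--
--     return regions
-- ===== SOURCE B (Python) =====
-- from itertools import groupby
--
-- def find_consecutive_true_regions(input_array):
--     regions = []
--     idx = 0
--     for key, group in groupby(input_array, key=bool):
--         n = sum(1 for _ in group)
--         if key and n > 1:
--             regions.append((idx, idx + n - 1))
--         idx += n
--     return regions
-- ===== Notes on version B (the rewrite author's own statement) =====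
-- stated objective: idiomatic
-- what changed: Replaces the index-based state machine (optional start index updated per element, plus a final flush) by itertools.groupby over maximal runs of equal truthiness, emitting each True run of length > 1 directly.
import Mathlib
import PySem

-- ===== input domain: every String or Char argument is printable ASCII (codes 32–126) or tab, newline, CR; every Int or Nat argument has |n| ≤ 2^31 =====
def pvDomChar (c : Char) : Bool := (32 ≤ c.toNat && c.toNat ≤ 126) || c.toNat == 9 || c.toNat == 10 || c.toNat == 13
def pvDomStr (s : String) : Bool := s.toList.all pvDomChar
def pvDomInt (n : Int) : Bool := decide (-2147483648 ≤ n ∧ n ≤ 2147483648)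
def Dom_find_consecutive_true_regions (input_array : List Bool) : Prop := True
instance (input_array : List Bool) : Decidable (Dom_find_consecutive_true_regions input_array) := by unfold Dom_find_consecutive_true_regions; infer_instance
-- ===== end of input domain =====

-- B replaces A's per-index state machine by grouping the list into maximal runs (idiomatic, same cost).

-- ===== PORT A =====
-- loop body of A: state is (start_index, regions), one step per index i with value v = input_array[i]
def pvStepA (acc : Option Int × List (Int × Int)) (iv : Int × Bool) :
    Option Int × List (Int × Int) :=
  match acc.1, iv.2 with
  | none, true => (some iv.1, acc.2)                 -- input_array[i] and start_index is None
  | some s, false =>                                  -- not input_array[i] and start_index is not None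
      (none, if iv.1 - s > 1 then acc.2 ++ [(s, iv.1 - 1)] else acc.2)
  | _, _ => acc

def find_consecutive_true_regions (input_array : List Bool) : List (Int × Int) :=
  let st := (PySem.List.pyRange 0 input_array.length 1).foldl
      (fun acc i => pvStepA acc (i, PySem.List.pyGetD input_array i false)) (none, [])
  match st.1 with
  | some s =>
      if (input_array.length : Int) - s > 1 then st.2 ++ [(s, (input_array.length : Int) - 1)]
      else st.2
  | none => st.2

-- ===== PORT B =====
-- groupby: peel the maximal run of elements equal to the head, emit it if True and length > 1
def pvAltGo (l : List Bool) (idx : Int) : List (Int × Int) :=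
  match l with
  | [] => []
  | b :: rest =>
    let n : Int := 1 + (rest.takeWhile (· == b)).length
    (if b ∧ n > 1 then [(idx, idx + n - 1)] else []) ++
      pvAltGo (rest.dropWhile (· == b)) (idx + n)
termination_by l.length
decreasing_by
  simpa using Nat.lt_succ_of_le (List.length_dropWhile_le _ _)

def find_consecutive_true_regions_alt (input_array : List Bool) : List (Int × Int) :=
  pvAltGo input_array 0

-- ===== PRECONDITION & SPEC =====
def Spec_find_consecutive_true_regions (input_array : List Bool) (out : List (Int × Int)) : Prop := out = find_consecutive_true_regions_alt input_array
instance (input_array : List Bool) (out : List (Int × Int)) : Decidable (Spec_find_consecutive_true_regions input_array out) := by unfold Spec_find_consecutive_true_regions; infer_instance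

-- ===== CLAIM (what is proved, stated in full; the proofs are below) =====
def Claim_equal_find_consecutive_true_regions : Prop := ∀ (input_array : List Bool), Dom_find_consecutive_true_regions input_array → Spec_find_consecutive_true_regions input_array (find_consecutive_true_regions input_array)

-- ===== LEMMAS AND PROOFS =====

-- reference element-wise recursion both ports are reduced to
def pvGo2 : List Bool → Int → Option Int → List (Int × Int)
  | [], idx, none => []
  | [], idx, some s => if idx - s > 1 then [(s, idx - 1)] else []
  | b :: rest, idx, none =>
      if b then pvGo2 rest (idx + 1) (some idx) else pvGo2 rest (idx + 1) none
  | b :: rest, idx, some s =>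
      if b then pvGo2 rest (idx + 1) (some s)
      else (if idx - s > 1 then [(s, idx - 1)] else []) ++ pvGo2 rest (idx + 1) none

def pvFlush (idx : Int) (st : Option Int × List (Int × Int)) : List (Int × Int) :=
  match st.1 with
  | some s => if idx - s > 1 then st.2 ++ [(s, idx - 1)] else st.2
  | none => st.2

theorem pvGo2_cons_none (b : Bool) (rest : List Bool) (idx : Int) :
    pvGo2 (b :: rest) idx none
      = if b then pvGo2 rest (idx + 1) (some idx) else pvGo2 rest (idx + 1) none := by
  cases b <;> simp [pvGo2]

theorem pvGo2_cons_some (b : Bool) (rest : List Bool) (idx s : Int) :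
    pvGo2 (b :: rest) idx (some s)
      = if b then pvGo2 rest (idx + 1) (some s)
        else (if idx - s > 1 then [(s, idx - 1)] else []) ++ pvGo2 rest (idx + 1) none := by
  cases b <;> simp [pvGo2]

theorem pvA_loop (l : List Bool) : ∀ (idx : Int) (s : Option Int) (regions : List (Int × Int)),
    pvFlush (idx + l.length) ((PySem.List.enumerate l idx).foldl pvStepA (s, regions))
      = regions ++ pvGo2 l idx s := by
  induction l with
  | nil =>
    intro idx s regions
    cases s with
    | none => simp [PySem.List.enumerate_nil, pvFlush, pvGo2]
    | some s' =>
      simp only [PySem.List.enumerate_nil, List.foldl_nil, pvFlush, pvGo2,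
        List.length_nil, Nat.cast_zero, add_zero]
      split_ifs <;> simp
  | cons b rest ih =>
    intro idx s regions
    rw [PySem.List.enumerate_cons, List.foldl_cons]
    have hlen : (idx + ((b :: rest).length : Int)) = (idx + 1) + (rest.length : Int) := by
      simp; ring
    rw [hlen]
    cases s with
    | none =>
      cases b with
      | true =>
        have hstep : pvStepA (none, regions) (idx, true) = (some idx, regions) := rfl
        rw [hstep, ih, pvGo2_cons_none]
        simp
      | false =>
        have hstep : pvStepA (none, regions) (idx, false) = (none, regions) := rfl
        rw [hstep, ih, pvGo2_cons_none]
        simp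
    | some s' =>
      cases b with
      | true =>
        have hstep : pvStepA (some s', regions) (idx, true) = (some s', regions) := rfl
        rw [hstep, ih, pvGo2_cons_some]
        simp
      | false =>
        have hstep : pvStepA (some s', regions) (idx, false)
            = (none, if idx - s' > 1 then regions ++ [(s', idx - 1)] else regions) := rfl
        rw [hstep, ih, pvGo2_cons_some]
        split_ifs <;> simp_all

theorem pvA_eq_go2 (arr : List Bool) :
    find_consecutive_true_regions arr = pvGo2 arr 0 none := by
  have h := pvA_loop arr 0 none []
  rw [PySem.List.enumerate_eq_map_pyRange arr false, List.foldl_map] at h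
  simp only [PySem.List.len, zero_add, List.nil_append] at h
  simpa [find_consecutive_true_regions, pvFlush] using h

theorem pvGo2_skip_true (t : List Bool) : ∀ (r : List Bool) (j s : Int),
    (∀ x ∈ t, x = true) →
    pvGo2 (t ++ r) j (some s) = pvGo2 r (j + t.length) (some s) := by
  induction t with
  | nil => intro r j s _; simp
  | cons a t ih =>
    intro r j s h
    have ha : a = true := h a (by simp)
    subst ha
    rw [List.cons_append, pvGo2_cons_some, if_pos rfl,
      ih r (j + 1) s (fun x hx => h x (by simp [hx]))]
    congr 1
    simp; ring

theorem pvGo2_skip_false (t : List Bool) : ∀ (r : List Bool) (j : Int),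
    (∀ x ∈ t, x = false) →
    pvGo2 (t ++ r) j none = pvGo2 r (j + t.length) none := by
  induction t with
  | nil => intro r j _; simp
  | cons a t ih =>
    intro r j h
    have ha : a = false := h a (by simp)
    subst ha
    rw [List.cons_append, pvGo2_cons_none, if_neg (by simp),
      ih r (j + 1) (fun x hx => h x (by simp [hx]))]
    congr 1
    simp; ring

-- closing a True region at a position whose element (if any) is False
theorem pvGo2_close (r : List Bool) (j s : Int) (h : r.head? ≠ some true) :
    pvGo2 r j (some s) = (if j - s > 1 then [(s, j - 1)] else []) ++ pvGo2 r j none := by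
  match r with
  | [] => simp [pvGo2]
  | c :: r2 =>
    have hc : c = false := by
      cases c
      · rfl
      · exact absurd rfl h
    subst hc
    rw [pvGo2_cons_some, pvGo2_cons_none]
    simp

theorem pvAlt_eq_go2 (N : ℕ) : ∀ (l : List Bool), l.length ≤ N → ∀ (idx : Int),
    pvAltGo l idx = pvGo2 l idx none := by
  induction N with
  | zero =>
    intro l hl idx
    have : l = [] := List.eq_nil_of_length_eq_zero (Nat.le_zero.mp hl)
    subst this; simp [pvAltGo, pvGo2]
  | succ N ih =>
    intro l hl idx
    match l with
    | [] => simp [pvAltGo, pvGo2]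
    | b :: rest =>
      have htake : ∀ x ∈ rest.takeWhile (· == b), x = b := by
        intro x hx
        simpa using List.mem_takeWhile_imp hx
      have hrest' : (rest.dropWhile (· == b)).length ≤ N := by
        have h1 := List.length_dropWhile_le (· == b) rest
        simp at hl; omega
      rw [pvAltGo]
      conv_rhs => rw [show b :: rest
          = b :: (rest.takeWhile (· == b) ++ rest.dropWhile (· == b)) from by
            rw [List.takeWhile_append_dropWhile]]
      cases b with
      | true =>
        rw [pvGo2_cons_none, if_pos rfl, pvGo2_skip_true _ _ _ _ htake]
        have harith : idx + 1 + ((rest.takeWhile (· == true)).length : Int)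
            = idx + (1 + ((rest.takeWhile (· == true)).length : Int)) := by ring
        rw [harith, pvGo2_close _ _ _ (by
          have := List.head?_dropWhile_not (· == true) rest
          intro hcontra
          rw [hcontra] at this
          simp at this)]
        rw [ih _ hrest']
        have harith2 : idx + (1 + ((rest.takeWhile (· == true)).length : Int)) - idx
            = 1 + ((rest.takeWhile (· == true)).length : Int) := by ring
        rw [harith2]
        simp
      | false =>
        rw [pvGo2_cons_none, if_neg (by simp), pvGo2_skip_false _ _ _ htake, ih _ hrest']
        have harith : idx + 1 + ((rest.takeWhile (· == false)).length : Int)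
            = idx + (1 + ((rest.takeWhile (· == false)).length : Int)) := by ring
        rw [harith]
        simp

-- ===== VERDICT (by name: the statement is the Claim_ definition above) =====
theorem find_consecutive_true_regions_spec : Claim_equal_find_consecutive_true_regions := by
  intro arr _
  unfold Spec_find_consecutive_true_regions find_consecutive_true_regions_alt
  rw [pvA_eq_go2, pvAlt_eq_go2 arr.length arr le_rfl 0]
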